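-- pv_equiv track=rewrite | github.com/ybaik/translation | tools_comp/diff_sentence.py | check_length_from_sentence
-- ===== SOURCE A (Python) =====
-- def check_length_from_sentence(sentence: str) -> int:
--     # Check if the sentence is hex-only
--     if "0x:" == sentence[:3]:
--         sentence = sentence[3:].split("#")[0]  # Remove the hex-only code and the comment
--         return len(sentence) // 2
--
--     total_length = 0
--     i = 0
--     while i < len(sentence):
--         character = sentence[i]
--         if character == "|":
--             if i + 1 < len(sentence):
--                 total_length += 1  # The character after '|' is 1-byte
--                 i += 1  # Move past the 1-byte character
--             else:
--                 # Trailing '|' without a character, treat as an error or 0 length.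
--                 # For now, let's just count 0 for the pipe itself, and next loop will handle past end.
--                 pass
--         elif character == "@":
--             total_length += 2
--         else:
--             # All other characters are assumed 2-byte
--             total_length += 2
--         i += 1
--
--     return total_length
-- ===== SOURCE B (Python) =====
-- def check_length_from_sentence(sentence: str) -> int:
--     # Hex-only branch kept as in the original
--     if "0x:" == sentence[:3]:
--         return len(sentence[3:].split("#")[0]) // 2
--
--     # Jump from pipe to pipe with find(): each pipe-free block of j chars
--     # contributes 2*j at once; a pipe plus its consumed successor (if any)
--     # contributes 1, a trailing pipe 0.
--     total = 0
--     s = sentence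
--     while True:
--         j = s.find("|")
--         if j == -1:
--             return total + 2 * len(s)
--         total += 2 * j
--         if j + 1 < len(s):
--             total += 1
--         s = s[j + 2:]
-- ===== Notes on version B (the rewrite author's own statement) =====
-- stated objective: faster
-- what changed: The per-character while loop is replaced by a block-skipping loop: find() locates the next '|', the whole pipe-free block contributes 2*length in one arithmetic step, then the pipe and its consumed successor are accounted for and the string is sliced past them; the hex branch is kept.
import Mathlib
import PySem

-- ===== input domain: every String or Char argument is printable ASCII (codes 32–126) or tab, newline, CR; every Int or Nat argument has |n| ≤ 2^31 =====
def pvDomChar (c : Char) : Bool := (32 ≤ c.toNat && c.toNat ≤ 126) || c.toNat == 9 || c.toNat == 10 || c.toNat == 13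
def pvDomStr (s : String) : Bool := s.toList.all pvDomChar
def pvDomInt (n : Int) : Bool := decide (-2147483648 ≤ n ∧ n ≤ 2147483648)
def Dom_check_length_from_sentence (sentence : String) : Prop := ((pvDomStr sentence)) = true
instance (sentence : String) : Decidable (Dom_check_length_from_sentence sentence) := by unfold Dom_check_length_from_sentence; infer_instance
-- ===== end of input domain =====

-- B replaces A's per-character while loop by a block-skipping loop: find() jumps to the
-- next '|', each pipe-free block contributes 2*length at once; the hex branch is kept.


-- ===== PORT A =====
-- A's while loop over index i, transliterated as structural recursion on the remaining
-- characters (sentence[i] = head, 'i + 1 < len' = rest ≠ [], 'i += 1' twice = drop two).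
def pvALoop : List Char → Int → Int
  | [], total => total
  | character :: rest, total =>
    if character = '|' then
      match rest with
      | _ :: rest' => pvALoop rest' (total + 1)  -- consume the 1-byte char after '|'
      | [] => pvALoop [] total                   -- trailing '|': pass, loop then ends
    else if character = '@' then
      pvALoop rest (total + 2)
    else
      pvALoop rest (total + 2)

def check_length_from_sentence (sentence : String) : Int :=
  if "0x:" = PySem.Str.slice sentence (some 0) (some 3) then
    -- split("#") always returns a non-empty list, so [0] is its head
    let s := PySem.Str.slice sentence (some 3) none
    let s := ((PySem.Str.split? s "#").getD []).headD ""
    PySem.Int.floordiv (PySem.Str.len s : Int) 2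
  else
    pvALoop sentence.toList 0

-- ===== PORT B =====
-- s.find('|') on the remaining characters (index of first '|', none if absent)
def pvFindPipe : List Char → Option Nat
  | [] => none
  | c :: cs => if c = '|' then some 0 else (pvFindPipe cs).map (· + 1)

theorem pvFindPipe_lt : ∀ {cs : List Char} {j : Nat}, pvFindPipe cs = some j → j < cs.length := by
  intro cs
  induction cs with
  | nil => intro j h; simp [pvFindPipe] at h
  | cons c cs ih =>
    intro j h
    by_cases hc : c = '|'
    · simp only [pvFindPipe, if_pos hc] at h
      injection h with h
      simp only [List.length_cons]
      omega
    · simp only [pvFindPipe, if_neg hc, Option.map_eq_some_iff] at h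
      obtain ⟨k, hk, rfl⟩ := h
      have := ih hk
      simp only [List.length_cons]
      omega

-- Source B's while loop: find the next '|', add 2*block, account for the pipe, slice past it
def pvBLoop (s : List Char) (total : Int) : Int :=
  match h : pvFindPipe s with
  | none => total + 2 * s.length
  | some j =>
    pvBLoop (s.drop (j + 2)) (total + 2 * (j : Int) + (if j + 1 < s.length then 1 else 0))
termination_by s.length
decreasing_by
  have := pvFindPipe_lt h
  simp [List.length_drop]; omega

def check_length_from_sentence_alt (sentence : String) : Int :=
  if "0x:" = PySem.Str.slice sentence (some 0) (some 3) then
    let s := PySem.Str.slice sentence (some 3) none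
    let s := ((PySem.Str.split? s "#").getD []).headD ""
    PySem.Int.floordiv (PySem.Str.len s : Int) 2
  else
    pvBLoop sentence.toList 0

-- ===== PRECONDITION & SPEC =====
def Spec_check_length_from_sentence (sentence : String) (out : Int) : Prop := out = check_length_from_sentence_alt sentence
instance (sentence : String) (out : Int) : Decidable (Spec_check_length_from_sentence sentence out) := by unfold Spec_check_length_from_sentence; infer_instance

-- ===== CLAIM (what is proved, stated in full; the proofs are below) =====
def Claim_equal_check_length_from_sentence : Prop := ∀ (sentence : String), Dom_check_length_from_sentence sentence → Spec_check_length_from_sentence sentence (check_length_from_sentence sentence)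

-- ===== LEMMAS AND PROOFS =====
theorem pvBLoop_none {s : List Char} (hf : pvFindPipe s = none) (t : Int) :
    pvBLoop s t = t + 2 * s.length := by
  rw [pvBLoop]; split <;> simp_all

theorem pvBLoop_some {s : List Char} {j : Nat} (hf : pvFindPipe s = some j) (t : Int) :
    pvBLoop s t = pvBLoop (s.drop (j + 2))
      (t + 2 * (j : Int) + (if j + 1 < s.length then 1 else 0)) := by
  rw [pvBLoop]; split <;> simp_all

theorem pvBLoop_nil (t : Int) : pvBLoop [] t = t := by
  rw [pvBLoop_none rfl]; simp

theorem pvBLoop_pipe (cs : List Char) (t : Int) :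
    pvBLoop ('|' :: cs) t = match cs with
      | [] => t
      | _ :: cs' => pvBLoop cs' (t + 1) := by
  rw [pvBLoop_some (by simp [pvFindPipe] : pvFindPipe ('|' :: cs) = some 0)]
  cases cs with
  | nil => simp [pvBLoop_nil]
  | cons x cs' => simp [List.length_cons]

theorem pvBLoop_other {c : Char} (h : c ≠ '|') (cs : List Char) (t : Int) :
    pvBLoop (c :: cs) t = pvBLoop cs (t + 2) := by
  cases hf : pvFindPipe cs with
  | none =>
    have hf' : pvFindPipe (c :: cs) = none := by simp [pvFindPipe, h, hf]
    rw [pvBLoop_none hf', pvBLoop_none hf]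
    simp [List.length_cons]; ring
  | some j =>
    have hf' : pvFindPipe (c :: cs) = some (j + 1) := by simp [pvFindPipe, h, hf]
    rw [pvBLoop_some hf', pvBLoop_some hf]
    have hd : List.drop (j + 1 + 2) (c :: cs) = List.drop (j + 2) cs := by
      have h3 : j + 1 + 2 = j + 2 + 1 := by omega
      rw [h3, List.drop_succ_cons]
    rw [hd]
    have hif : (if j + 1 + 1 < (c :: cs).length then (1 : Int) else 0)
        = (if j + 1 < cs.length then (1 : Int) else 0) := by
      simp only [List.length_cons]
      by_cases hlt : j + 1 < cs.length
      · rw [if_pos (by omega), if_pos hlt]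
      · rw [if_neg (by omega), if_neg hlt]
    rw [hif]
    congr 1
    push_cast; ring

theorem pvALoop_eq_pvBLoop (cs : List Char) (total : Int) :
    pvALoop cs total = pvBLoop cs total := by
  induction cs, total using pvALoop.induct with
  | case1 t => simp [pvALoop, pvBLoop_nil]
  | case2 t x rest' ih => simp [pvALoop, pvBLoop_pipe, ih]
  | case3 t ih => simp [pvALoop, pvBLoop_pipe]
  | case4 rest t hc ih =>
    rw [pvALoop.eq_def]; simp [hc, pvBLoop_other hc, ih]
  | case5 c rest t hc h2 ih =>
    rw [pvALoop.eq_def]; simp [hc, h2, pvBLoop_other hc, ih]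

-- ===== VERDICT (by name: the statement is the Claim_ definition above) =====
theorem check_length_from_sentence_spec : Claim_equal_check_length_from_sentence := by
  intro sentence _
  unfold Spec_check_length_from_sentence check_length_from_sentence check_length_from_sentence_alt
  split
  · rfl
  · exact pvALoop_eq_pvBLoop sentence.toList 0
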